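-- pv_equiv track=rewrite | github.com/fasihgds-afk/hik-attendance-system-main | agent/agent_core/tracker.py | _score_position_diversity
-- ===== SOURCE A (Python) =====
-- def _score_position_diversity(click_positions):
--     """Real humans click many positions. Auto-clickers repeat same spot."""
--     if len(click_positions) < 3:
--         return 20
--     unique = set()
--     for x, y in click_positions:
--         unique.add((x // 20, y // 20))
--     diversity = len(unique) / len(click_positions)
--     if diversity < 0.05:
--         return 0
--     if diversity < 0.10:
--         return 4
--     if diversity < 0.20:
--         return 8
--     if diversity < 0.40:
--         return 12
--     if diversity < 0.60:
--         return 16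
--     return 20
-- ===== SOURCE B (Python) =====
-- def _score_position_diversity(click_positions):
--     """Real humans click many positions. Auto-clickers repeat same spot."""
--     n = len(click_positions)
--     if n < 3:
--         return 20
--     # sort-then-scan: duplicates of a grid cell become adjacent, so the number of
--     # distinct cells is 1 + (number of adjacent unequal pairs)
--     cells = sorted((x // 20, y // 20) for x, y in click_positions)
--     unique = 1 + sum(1 for a, b in zip(cells, cells[1:]) if a != b)
--     diversity = unique / n
--     score = 0
--     for t in (0.05, 0.10, 0.20, 0.40, 0.60):
--         if diversity < t:
--             break
--         score += 4
--     return score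
-- ===== Notes on version B (the rewrite author's own statement) =====
-- stated objective: alternative
-- what changed: Distinct grid cells are counted by sorting the bucketed cells and scanning adjacent unequal pairs (sort-then-scan) instead of accumulating a hash set, and the five-way if-cascade becomes an accumulating early-break loop over a threshold table.
import Mathlib
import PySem

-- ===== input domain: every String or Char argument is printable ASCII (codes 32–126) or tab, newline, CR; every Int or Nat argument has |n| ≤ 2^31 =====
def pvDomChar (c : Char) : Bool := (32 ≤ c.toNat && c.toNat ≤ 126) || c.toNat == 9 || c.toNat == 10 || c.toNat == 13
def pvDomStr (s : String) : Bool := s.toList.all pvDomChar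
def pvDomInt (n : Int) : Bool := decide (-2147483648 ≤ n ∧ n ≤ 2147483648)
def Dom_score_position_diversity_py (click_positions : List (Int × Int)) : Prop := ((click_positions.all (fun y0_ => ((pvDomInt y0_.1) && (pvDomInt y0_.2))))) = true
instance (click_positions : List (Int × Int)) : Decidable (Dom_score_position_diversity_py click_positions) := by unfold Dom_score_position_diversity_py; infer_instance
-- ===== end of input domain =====

-- B counts distinct grid cells by sorting the bucketed cells and scanning adjacent unequal pairs
-- (sort-then-scan) instead of accumulating a hash set, and turns the five-way if-cascade into an
-- accumulating early-break loop over a threshold table (objective: alternative algorithm).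
-- Python's float comparisons 'diversity < t' are ported as exact rational comparisons on integers;
-- this is exact for every list length below 10^15 (the double nearest to each threshold is within
-- 3e-17 of it, a gap u/n cannot enter for such n), far beyond any real input.

-- ===== PORT A =====
def score_position_diversity_py (click_positions : List (Int × Int)) : Int :=
  if click_positions.length < 3 then 20
  else
    -- unique = set(); for x, y in …: unique.add((x // 20, y // 20))
    let unique : PySem.Set (Int × Int) :=
      click_positions.foldl
        (fun s p => PySem.Set.add s (PySem.Int.floordiv p.1 20, PySem.Int.floordiv p.2 20))
        PySem.Set.empty
    let u : Int := (unique.length : Int)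
    let n : Int := (click_positions.length : Int)
    -- diversity = u / n; 'diversity < c' is the exact rational comparison (see header)
    if 20 * u < n then 0
    else if 10 * u < n then 4
    else if 5 * u < n then 8
    else if 5 * u < 2 * n then 12
    else if 5 * u < 3 * n then 16
    else 20

-- ===== PORT B =====
-- the threshold tuple (0.05, 0.10, 0.20, 0.40, 0.60) as exact fractions
def pvThresholds : List (Int × Int) := [(1, 20), (1, 10), (1, 5), (2, 5), (3, 5)]

-- 'score = 0; for t in thresholds: if diversity < t: break; score += 4'
-- ('diversity < t' = 'u/n < t.1/t.2' written exactly as 't.2*u < t.1*n', see header)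
def pvScoreLoop (u n : Int) : List (Int × Int) → Int → Int
  | [], score => score
  | t :: ts, score => if t.2 * u < t.1 * n then score else pvScoreLoop u n ts (score + 4)

def score_position_diversity_py_alt (click_positions : List (Int × Int)) : Int :=
  let n : Int := (click_positions.length : Int)
  if n < 3 then 20
  else
    -- cells = sorted((x // 20, y // 20) for x, y in click_positions)  (tuple sort = sorted2 fst snd)
    let cells :=
      PySem.List.sorted2
        (click_positions.map (fun p => (PySem.Int.floordiv p.1 20, PySem.Int.floordiv p.2 20)))
        Prod.fst Prod.snd
    -- unique = 1 + sum(1 for a, b in zip(cells, cells[1:]) if a != b)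
    let unique : Int :=
      1 + (((cells.zip (PySem.List.slice cells (some 1) none)).countP
              (fun ab => decide (ab.1 ≠ ab.2)) : Nat) : Int)
    pvScoreLoop unique n pvThresholds 0

-- ===== PRECONDITION & SPEC =====
def Spec_score_position_diversity_py (click_positions : List (Int × Int)) (out : Int) : Prop := out = score_position_diversity_py_alt click_positions
instance (click_positions : List (Int × Int)) (out : Int) : Decidable (Spec_score_position_diversity_py click_positions out) := by unfold Spec_score_position_diversity_py; infer_instance

-- ===== CLAIM (what is proved, stated in full; the proofs are below) =====
def Claim_equal_score_position_diversity_py : Prop := ∀ (click_positions : List (Int × Int)), Dom_score_position_diversity_py click_positions → Spec_score_position_diversity_py click_positions (score_position_diversity_py click_positions)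

-- ===== LEMMAS AND PROOFS =====

-- A's accumulation loop builds set(cells) of the mapped list
lemma pv_set_eq (click_positions : List (Int × Int)) :
    click_positions.foldl
        (fun s p => PySem.Set.add s (PySem.Int.floordiv p.1 20, PySem.Int.floordiv p.2 20))
        PySem.Set.empty
      = PySem.Set.ofList (click_positions.map
          (fun p => (PySem.Int.floordiv p.1 20, PySem.Int.floordiv p.2 20))) := by
  rw [PySem.Set.ofList_eq_foldl, List.foldl_map]
  rfl

-- set(l) has as many elements as set(l') when l' is a rearrangement of l
lemma pv_ofList_length_perm {α : Type} [BEq α] [LawfulBEq α] {l₁ l₂ : List α}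
    (h : l₁.Perm l₂) : (PySem.Set.ofList l₁).length = (PySem.Set.ofList l₂).length := by
  have hp : (PySem.Set.ofList l₁).Perm (PySem.Set.ofList l₂) :=
    (List.perm_ext_iff_of_nodup (PySem.Set.nodup_ofList l₁) (PySem.Set.nodup_ofList l₂)).2
      (fun a => by simp only [PySem.Set.mem_ofList]; exact h.mem_iff)
  exact hp.length_eq

-- Python's tuple sort is the sort by the lexicographic key
lemma pv_sorted2_lex (xs : List (Int × Int)) :
    PySem.List.sorted2 xs Prod.fst Prod.snd false
      = PySem.List.sorted xs (fun p => toLex p : Int × Int → Lex (Int × Int)) false := by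
  have hcmp : (fun a b : Int × Int =>
        decide (a.1 < b.1) || (!decide (b.1 < a.1) && decide (a.2 < b.2)))
      = (fun a b : Int × Int => decide (toLex a < toLex b)) := by
    funext a b
    by_cases h1 : a.1 < b.1 <;> by_cases h2 : b.1 < a.1 <;> by_cases h3 : a.2 < b.2 <;>
      simp [Prod.Lex.toLex_lt_toLex, h1, h2, h3] <;> omega
  unfold PySem.List.sorted2 PySem.List.sorted
  simp only [Bool.false_eq_true, if_false]
  rw [hcmp]

lemma pv_discard_of_not_mem {α : Type} [BEq α] [LawfulBEq α] {s : PySem.Set α} {x : α}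
    (h : x ∉ s) : PySem.Set.discard s x = s := by
  unfold PySem.Set.discard
  refine List.filter_eq_self.2 (fun a ha => ?_)
  have hne : a ≠ x := fun e => h (e ▸ ha)
  simp [hne]

-- in a (weakly) sorted run, # distinct elements = 1 + # adjacent unequal pairs
lemma pv_chain_count (l : List (Int × Int))
    (hp : l.Pairwise (fun a b => toLex a ≤ toLex b)) (hne : l ≠ []) :
    (PySem.Set.ofList l).length
      = 1 + (l.zip l.tail).countP (fun ab => decide (ab.1 ≠ ab.2)) := by
  induction l with
  | nil => exact absurd rfl hne
  | cons x t ih =>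
    cases t with
    | nil =>
      simp [PySem.Set.ofList_cons, PySem.Set.ofList_nil, PySem.Set.discard]
    | cons y t' =>
      rcases List.pairwise_cons.1 hp with ⟨hx, hp'⟩
      by_cases hxy : x = y
      · subst hxy
        have hset : PySem.Set.ofList (x :: x :: t') = PySem.Set.ofList (x :: t') := by
          rw [PySem.Set.ofList_cons, PySem.Set.ofList_cons]
          unfold PySem.Set.discard
          simp [List.filter_filter]
        rw [hset, ih hp' (List.cons_ne_nil _ _)]
        simp
      · have hnot : x ∉ y :: t' := by
          intro hmem
          have hle1 : toLex x ≤ toLex y := hx y (List.mem_cons_self)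
          rcases List.mem_cons.1 hmem with rfl | hmem'
          · exact hxy rfl
          · have hle2 : toLex y ≤ toLex x :=
              (List.pairwise_cons.1 hp').1 x hmem'
            exact hxy (toLex.injective (le_antisymm hle1 hle2))
        have hset : PySem.Set.ofList (x :: y :: t') = x :: PySem.Set.ofList (y :: t') := by
          rw [PySem.Set.ofList_cons,
              pv_discard_of_not_mem (by simpa [PySem.Set.mem_ofList] using hnot)]
        rw [hset]
        simp only [List.length_cons, List.tail_cons, List.zip_cons_cons, List.countP_cons,
          ih hp' (List.cons_ne_nil _ _), decide_eq_true_eq]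
        simp [hxy]
        omega

-- the if-cascade equals B's accumulating threshold loop
lemma pv_cascade_eq (u n : Int) :
    (if 20 * u < n then (0 : Int)
     else if 10 * u < n then 4
     else if 5 * u < n then 8
     else if 5 * u < 2 * n then 12
     else if 5 * u < 3 * n then 16
     else 20)
      = pvScoreLoop u n pvThresholds 0 := by
  simp only [pvThresholds, pvScoreLoop]
  norm_num

-- ===== VERDICT (by name: the statement is the Claim_ definition above) =====
theorem score_position_diversity_py_spec : Claim_equal_score_position_diversity_py := by
  intro cp _
  show score_position_diversity_py cp = score_position_diversity_py_alt cp
  unfold score_position_diversity_py score_position_diversity_py_alt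
  by_cases h : cp.length < 3
  · simp [h, show (cp.length : Int) < 3 by exact_mod_cast h]
  · have h' : ¬ ((cp.length : Int) < 3) := by exact_mod_cast h
    simp only [h, h', if_false]
    rw [pv_set_eq]
    set m := cp.map (fun p => (PySem.Int.floordiv p.1 20, PySem.Int.floordiv p.2 20)) with hm
    set cells := PySem.List.sorted2 m Prod.fst Prod.snd with hcells
    have hperm : cells.Perm m := PySem.List.sorted2_perm m Prod.fst Prod.snd false
    have hpair : cells.Pairwise (fun a b => toLex a ≤ toLex b) := by
      rw [hcells, pv_sorted2_lex]
      exact PySem.List.sorted_pairwise m (fun p => toLex p)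
    have hne : cells ≠ [] := by
      intro hnil
      have hm0 : m.Perm [] := by rw [← hnil]; exact hperm.symm
      have hlen : cp.length = 0 := by
        simpa [hm] using congrArg List.length hm0.eq_nil
      omega
    have hu : (PySem.Set.ofList m).length
        = 1 + (cells.zip cells.tail).countP (fun ab => decide (ab.1 ≠ ab.2)) := by
      rw [pv_ofList_length_perm hperm.symm]
      exact pv_chain_count cells hpair hne
    rw [PySem.List.slice_from_one, hu]
    push_cast
    rw [← pv_cascade_eq]
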